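-- pv_equiv track=rewrite | github.com/yoonseokham/algorithm | leetcode/can-place-flowers.py | inadjacentChoice
-- ===== SOURCE A (Python) =====
-- def inadjacentChoice(plantAbleSet, n):
--     plantAbles = sorted(list(plantAbleSet))
--     stack = []
--     for i, value in enumerate(plantAbles):
--         if not stack:
--             stack.append(value)
--         elif stack[-1] - value == -1:
--             continue
--         else:
--             stack.append(value)
--     return len(stack) >= n
-- ===== SOURCE B (Python) =====
-- def inadjacentChoice(plantAbleSet, n):
--     counts = {}
--     for v in plantAbleSet:
--         counts[v] = counts.get(v, 0) + 1
--     total = 0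
--     offset = 0
--     prev = None
--     for v in sorted(counts):
--         if prev is not None and v == prev + 1:
--             offset += 1
--         else:
--             offset = 0
--         if offset % 2 == 0:
--             total += counts[v]
--         prev = v
--     return total >= n
-- ===== Notes on version B (the rewrite author's own statement) =====
-- stated objective: alternative
-- what changed: B replaces A's per-element stack simulation over the sorted list by a frequency dict plus a single run-scan over the sorted distinct values, adding each multiplicity only at even offsets within a consecutive run.
import Mathlib
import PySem

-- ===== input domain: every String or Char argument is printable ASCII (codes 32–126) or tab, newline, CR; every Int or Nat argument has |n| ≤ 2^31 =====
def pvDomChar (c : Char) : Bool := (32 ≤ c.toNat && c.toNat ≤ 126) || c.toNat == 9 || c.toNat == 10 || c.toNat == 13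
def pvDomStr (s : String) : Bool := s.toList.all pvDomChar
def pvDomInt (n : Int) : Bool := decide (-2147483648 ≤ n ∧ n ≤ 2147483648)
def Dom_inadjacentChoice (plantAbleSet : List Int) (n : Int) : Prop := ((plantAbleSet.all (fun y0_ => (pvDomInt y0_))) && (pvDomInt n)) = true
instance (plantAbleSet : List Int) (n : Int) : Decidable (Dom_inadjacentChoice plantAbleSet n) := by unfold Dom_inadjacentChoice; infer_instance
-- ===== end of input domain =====

-- B replaces A's per-element greedy stack over the sorted list by a frequency dict plus a
-- run-scan over the sorted distinct values (alternative decomposition, same asymptotic cost).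

-- ===== PORT A =====
-- stack is kept exactly as Python's list: append = ++ [value], stack[-1] = getLast!
def inadjacentChoice (plantAbleSet : List Int) (n : Int) : Bool :=
  let plantAbles := PySem.List.sorted plantAbleSet (fun x => x) false
  let stack := plantAbles.foldl (fun stack value =>
      if stack = [] then stack ++ [value]
      else if stack.getLast! - value == -1 then stack
      else stack ++ [value]) ([] : List Int)
  decide ((stack.length : Int) ≥ n)

-- ===== PORT B =====
-- body of Source B's second loop; state = (total, offset, prev)
def stepB (counts : PySem.Dict Int Int) (st : Int × Int × Option Int) (v : Int) : Int × Int × Option Int :=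
  let offset : Int := match st.2.2 with
    | some p => if v == p + 1 then st.2.1 + 1 else 0
    | none => 0
  let total := if offset % 2 == 0 then st.1 + counts.getD v 0 else st.1
  (total, offset, some v)

def inadjacentChoice_alt (plantAbleSet : List Int) (n : Int) : Bool :=
  let counts := plantAbleSet.foldl (fun d v => d.insert v (d.getD v 0 + 1))
      (PySem.Dict.empty : PySem.Dict Int Int)
  let res := (PySem.List.sorted counts.keys (fun x => x) false).foldl
      (stepB counts) ((0 : Int), (0 : Int), (none : Option Int))
  decide (res.1 ≥ n)

-- ===== PRECONDITION & SPEC =====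
def Spec_inadjacentChoice (plantAbleSet : List Int) (n : Int) (out : Bool) : Prop := out = inadjacentChoice_alt plantAbleSet n
instance (plantAbleSet : List Int) (n : Int) (out : Bool) : Decidable (Spec_inadjacentChoice plantAbleSet n out) := by unfold Spec_inadjacentChoice; infer_instance

-- ===== CLAIM (what is proved, stated in full; the proofs are below) =====
def Claim_equal_inadjacentChoice : Prop := ∀ (plantAbleSet : List Int) (n : Int), Dom_inadjacentChoice plantAbleSet n → Spec_inadjacentChoice plantAbleSet n (inadjacentChoice plantAbleSet n)

-- ===== LEMMAS AND PROOFS =====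

-- number of greedy picks over a list, given the last picked value
def pushCountA : Option Int → List Int → Nat
  | _, [] => 0
  | last, v :: rest =>
    if last = some (v - 1) then pushCountA last rest else 1 + pushCountA (some v) rest

lemma getLast!_some {s : List Int} {p : Int} (h : s.getLast? = some p) : s.getLast! = p := by
  cases s with
  | nil => cases h
  | cons a t => simp_all [List.getLast!, List.getLast?]

lemma stackFold_length (l : List Int) : ∀ (s : List Int),
    (l.foldl (fun stack value =>
      if stack = [] then stack ++ [value]
      else if stack.getLast! - value == -1 then stack
      else stack ++ [value]) s).length = s.length + pushCountA s.getLast? l := by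
  induction l with
  | nil => intro s; simp [pushCountA]
  | cons v t ih =>
    intro s
    simp only [List.foldl_cons]
    rcases hlast : s.getLast? with _ | p
    · have hs : s = [] := List.getLast?_eq_none_iff.mp hlast
      subst hs
      rw [if_pos rfl, ih]
      simp [pushCountA]
    · have hs : ¬ (s = []) := by rintro rfl; cases hlast
      have hg : s.getLast! = p := getLast!_some hlast
      rw [if_neg hs, hg]
      by_cases hp : p - v = -1
      · rw [if_pos (beq_iff_eq.mpr hp), ih, hlast]
        have hpv : some p = some (v - 1) := by rw [Option.some_inj]; omega
        simp [pushCountA, hpv]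
      · rw [if_neg (by simpa using hp), ih, List.getLast?_concat]
        have hne : ¬ (some p = some (v - 1)) := by rw [Option.some_inj]; omega
        simp only [pushCountA, if_neg hne, List.length_append, List.length_cons, List.length_nil]
        omega

def flatRep (cnt : Int → Nat) (l : List Int) : List Int :=
  l.flatMap (fun u => List.replicate (cnt u) u)

lemma flatRep_nil (cnt : Int → Nat) : flatRep cnt [] = [] := rfl

lemma flatRep_cons (cnt : Int → Nat) (u : Int) (t : List Int) :
    flatRep cnt (u :: t) = List.replicate (cnt u) u ++ flatRep cnt t := rfl

lemma count_flatRep (cnt : Int → Nat) (l : List Int) (hnd : l.Nodup) (a : Int) :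
    (flatRep cnt l).count a = if a ∈ l then cnt a else 0 := by
  induction l with
  | nil => simp [flatRep_nil]
  | cons u t ih =>
    rcases List.nodup_cons.mp hnd with ⟨hu, ht⟩
    rw [flatRep_cons, List.count_append, List.count_replicate, ih ht]
    by_cases hau : u = a
    · subst hau; simp [hu]
    · have h1 : ¬ ((u == a) = true) := by simpa using hau
      rw [if_neg h1]
      by_cases hat : a ∈ t
      · rw [if_pos hat, if_pos (List.mem_cons_of_mem _ hat), Nat.zero_add]
      · rw [if_neg hat, if_neg (by simp [hat]; exact fun h => hau h.symm)]

lemma pairwise_flatRep (cnt : Int → Nat) (l : List Int) (hp : l.Pairwise (· < ·)) :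
    (flatRep cnt l).Pairwise (· ≤ ·) := by
  induction l with
  | nil => simp [flatRep_nil]
  | cons u t ih =>
    rcases List.pairwise_cons.mp hp with ⟨hu, ht⟩
    rw [flatRep_cons, List.pairwise_append]
    refine ⟨List.pairwise_replicate.mpr (Or.inr le_rfl), ih ht, ?_⟩
    intro a ha b hb
    rcases List.mem_flatMap.mp hb with ⟨w, hw, hbw⟩
    rw [List.eq_of_mem_replicate ha, List.eq_of_mem_replicate hbw]
    exact le_of_lt (hu w hw)

lemma pushCountA_replicate_append (u : Int) : ∀ (m : Nat), 0 < m →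
    ∀ (last : Option Int) (rest : List Int),
    pushCountA last (List.replicate m u ++ rest) =
      if last = some (u - 1) then pushCountA last rest else m + pushCountA (some u) rest := by
  intro m
  induction m with
  | zero => intro h; exact absurd h (lt_irrefl 0)
  | succ m ih =>
    intro _ last rest
    rcases Nat.eq_zero_or_pos m with hm0 | hm0
    · subst hm0
      by_cases h : last = some (u - 1) <;> simp [pushCountA, List.replicate_one, h]
    · rw [List.replicate_succ, List.cons_append]
      simp only [pushCountA]
      rw [ih hm0]
      by_cases h : last = some (u - 1)
      · rw [if_pos h, if_pos h, if_pos h]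
      · have hne : ¬ (some u = some (u - 1)) := by rw [Option.some_inj]; omega
        rw [if_neg h, if_neg h, ih hm0, if_neg hne]
        omega

lemma stepB_none (counts : PySem.Dict Int Int) (total offset v : Int) :
    stepB counts (total, offset, none) v = (total + counts.getD v 0, 0, some v) := by
  simp [stepB]

lemma stepB_consec_odd (counts : PySem.Dict Int Int) (total offset p v : Int)
    (hb : (v == p + 1) = true) (h2 : ¬ (offset + 1) % 2 = 0) :
    stepB counts (total, offset, some p) v = (total, offset + 1, some v) := by
  simp [stepB, hb, h2]

lemma stepB_consec_even (counts : PySem.Dict Int Int) (total offset p v : Int)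
    (hb : (v == p + 1) = true) (h2 : (offset + 1) % 2 = 0) :
    stepB counts (total, offset, some p) v = (total + counts.getD v 0, offset + 1, some v) := by
  simp [stepB, hb, h2]

lemma stepB_nonconsec (counts : PySem.Dict Int Int) (total offset p v : Int)
    (hb : (v == p + 1) = false) :
    stepB counts (total, offset, some p) v = (total + counts.getD v 0, 0, some v) := by
  simp [stepB, hb]

-- the invariant tying B's (offset, prev) to the greedy "last picked" value
def InvB (prev : Option Int) (offset : Int) (last : Option Int) : Prop :=
  match prev with
  | none => last = none
  | some p => (offset % 2 = 0 ∧ last = some p) ∨ (¬ offset % 2 = 0 ∧ last = some (p - 1))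

lemma foldB_total (cnt : Int → Nat) (counts : PySem.Dict Int Int)
    (hc : ∀ v, counts.getD v 0 = (cnt v : Int)) :
    ∀ (l : List Int) (total offset : Int) (prev last : Option Int),
    l.Pairwise (· < ·) →
    (∀ v ∈ l, 0 < cnt v) →
    (∀ v ∈ l, ∀ p, prev = some p → p < v) →
    InvB prev offset last →
    (l.foldl (stepB counts) (total, offset, prev)).1
      = total + (pushCountA last (flatRep cnt l) : Nat) := by
  intro l
  induction l with
  | nil => intro total offset prev last _ _ _ _; simp [flatRep_nil, pushCountA]
  | cons v t ih =>
    intro total offset prev last hpw hcnt hlt hinv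
    have hcv : 0 < cnt v := hcnt v (List.mem_cons_self)
    rcases List.pairwise_cons.mp hpw with ⟨hvt, hpt⟩
    have hcnt' : ∀ w ∈ t, 0 < cnt w := fun w hw => hcnt w (List.mem_cons_of_mem _ hw)
    have hlt' : ∀ w ∈ t, ∀ q, some v = some q → q < w := by
      intro w hw q hq
      cases hq
      exact hvt w hw
    rw [flatRep_cons, pushCountA_replicate_append v (cnt v) hcv, List.foldl_cons]
    cases prev with
    | none =>
      have hlastn : last = none := hinv
      rw [stepB_none, ih (total + counts.getD v 0) 0 (some v) (some v) hpt hcnt' hlt'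
        (Or.inl ⟨by decide, rfl⟩)]
      rw [if_neg (by simp [hlastn]), hc v]
      push_cast
      ring
    | some p =>
      by_cases hpv : v = p + 1
      · have hb : (v == p + 1) = true := beq_iff_eq.mpr hpv
        rcases hinv with ⟨heven, hlastp⟩ | ⟨hodd, hlastp⟩
        · -- last = some p = some (v-1): skip the whole group
          rw [stepB_consec_odd counts total offset p v hb (by omega)]
          have hlast' : last = some (v - 1) := by rw [hlastp, Option.some_inj]; omega
          rw [ih total (offset + 1) (some v) last hpt hcnt' hlt'
            (Or.inr ⟨by omega, hlast'⟩)]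
          rw [if_pos hlast']
        · -- last = some (p-1) ≠ some (v-1): the group is picked
          rw [stepB_consec_even counts total offset p v hb (by omega)]
          have hlast' : ¬ (last = some (v - 1)) := by
            rw [hlastp, Option.some_inj]; omega
          rw [ih (total + counts.getD v 0) (offset + 1) (some v) (some v) hpt hcnt' hlt'
            (Or.inl ⟨by omega, rfl⟩)]
          rw [if_neg hlast', hc v]
          push_cast
          ring
      · have hb : (v == p + 1) = false := by simpa using hpv
        have hpltv : p < v := hlt v (List.mem_cons_self) p rfl
        have hlast' : ¬ (last = some (v - 1)) := by
          rcases hinv with ⟨_, hl⟩ | ⟨_, hl⟩ <;> rw [hl, Option.some_inj] <;> omega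
        rw [stepB_nonconsec counts total offset p v hb,
          ih (total + counts.getD v 0) 0 (some v) (some v) hpt hcnt' hlt'
            (Or.inl ⟨by decide, rfl⟩)]
        rw [if_neg hlast', hc v]
        push_cast
        ring

lemma sorted_eq_flatRep (xs : List Int) :
    PySem.List.sorted xs (fun x => x) false
      = flatRep (fun u => xs.count u) (PySem.List.sorted (PySem.Set.ofList xs) (fun x => x) false) := by
  have hpl : (PySem.List.sorted (PySem.Set.ofList xs) (fun x => x) false).Pairwise (· < ·) :=
    PySem.List.sorted_ofList_pairwise_lt xs
  have hnd : (PySem.List.sorted (PySem.Set.ofList xs) (fun x => x) false).Nodup :=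
    hpl.imp (fun h => ne_of_lt h)
  have hmem : ∀ a, a ∈ PySem.List.sorted (PySem.Set.ofList xs) (fun x => x) false ↔ a ∈ xs := by
    intro a
    rw [PySem.List.mem_sorted, PySem.Set.mem_ofList]
  apply PySem.List.sorted_id_eq_of_perm_of_pairwise
  · apply List.perm_iff_count.mpr
    intro a
    rw [count_flatRep _ _ hnd a]
    by_cases ha : a ∈ xs
    · rw [if_pos ((hmem a).mpr ha)]
    · rw [if_neg (fun h => ha ((hmem a).mp h))]
      exact (List.count_eq_zero.mpr ha).symm
  · exact pairwise_flatRep _ _ hpl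

-- ===== VERDICT (by name: the statement is the Claim_ definition above) =====
theorem inadjacentChoice_spec : Claim_equal_inadjacentChoice := by
  intro xs n _
  unfold Spec_inadjacentChoice
  simp only [inadjacentChoice, inadjacentChoice_alt]
  rw [stackFold_length, PySem.Dict.foldl_insert_getD_add_one_eq_counter, PySem.Dict.keys_counter]
  rw [foldB_total (fun u => xs.count u) (PySem.Dict.counter xs)
      (fun v => PySem.Dict.getD_counter xs v) _ 0 0 none none
      (PySem.List.sorted_ofList_pairwise_lt xs)
      (fun v hv => List.count_pos_iff.mpr (by
        rw [PySem.List.mem_sorted, PySem.Set.mem_ofList] at hv; exact hv))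
      (fun v _ p hp => by cases hp) rfl]
  rw [← sorted_eq_flatRep]
  simp
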